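-- pv_equiv track=rewrite | github.com/SamiraSamrose/arm-adaptive-intelligence | src/core/arm_optimizer.py | enable_operator_fusion
-- ===== SOURCE A (Python) =====
-- from typing import Dict, List, Optional
--
-- def enable_operator_fusion(graph_ops: List[str]) -> List[str]:
--     """
--     Fuses operators for reduced memory access and improved performance
--     """
--     fused_ops = []
--     i = 0
--
--     while i < len(graph_ops):
--         if i < len(graph_ops) - 1:
--             if graph_ops[i] == "conv2d" and graph_ops[i+1] == "relu":
--                 fused_ops.append("conv2d_relu_fused")
--                 i += 2
--                 continue
--             elif graph_ops[i] == "matmul" and graph_ops[i+1] == "add":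
--                 fused_ops.append("matmul_add_fused")
--                 i += 2
--                 continue
--
--         fused_ops.append(graph_ops[i])
--         i += 1
--
--     return fused_ops
-- ===== SOURCE B (Python) =====
-- def enable_operator_fusion(graph_ops):
--     out = []
--     for op in graph_ops:
--         out.append(op)
--         if out[-2:] == ["conv2d", "relu"]:
--             out[-2:] = ["conv2d_relu_fused"]
--         elif out[-2:] == ["matmul", "add"]:
--             out[-2:] = ["matmul_add_fused"]
--     return out
-- ===== Notes on version B (the rewrite author's own statement) =====
-- stated objective: alternative
-- what changed: Replaces the index-based while loop with two-element lookahead and skip by a stack-style build: each op is pushed, and fusion is decided by looking back at the last two pushed elements.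
import Mathlib
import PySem

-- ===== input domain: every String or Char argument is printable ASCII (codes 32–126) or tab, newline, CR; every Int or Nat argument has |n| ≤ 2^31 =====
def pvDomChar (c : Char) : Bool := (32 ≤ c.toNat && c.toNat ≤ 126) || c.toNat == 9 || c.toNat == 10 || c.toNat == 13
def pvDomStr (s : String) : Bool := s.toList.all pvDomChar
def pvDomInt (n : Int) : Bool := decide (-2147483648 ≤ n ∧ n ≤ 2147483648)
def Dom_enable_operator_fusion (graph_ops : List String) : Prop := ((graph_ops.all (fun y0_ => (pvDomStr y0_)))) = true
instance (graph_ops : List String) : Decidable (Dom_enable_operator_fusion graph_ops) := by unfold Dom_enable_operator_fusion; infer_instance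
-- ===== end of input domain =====

-- ===== PORT A =====
-- A: index-based while loop with two-element lookahead; ported as recursion on the
-- remaining suffix (i+=1 drops one element, i+=2 drops two).
def enable_operator_fusion (graph_ops : List String) : List String :=
  match graph_ops with
  | [] => []
  | [a] => [a]
  | a :: b :: rest =>
    if a = "conv2d" ∧ b = "relu" then "conv2d_relu_fused" :: enable_operator_fusion rest
    else if a = "matmul" ∧ b = "add" then "matmul_add_fused" :: enable_operator_fusion rest
    else a :: enable_operator_fusion (b :: rest)
termination_by graph_ops.length
decreasing_by all_goals simp

-- ===== PORT B =====
-- B: stack-style build — push each op, then look back at the last two pushed elements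
-- (out[-2:]) and replace them by the fused token if they form a fusable pair.
def fuseStep (out : List String) (op : String) : List String :=
  let out' := out ++ [op]
  let t := out'.drop (out'.length - 2)
  if t = ["conv2d", "relu"] then out'.take (out'.length - 2) ++ ["conv2d_relu_fused"]
  else if t = ["matmul", "add"] then out'.take (out'.length - 2) ++ ["matmul_add_fused"]
  else out'

def enable_operator_fusion_alt (graph_ops : List String) : List String :=
  graph_ops.foldl fuseStep []

-- ===== PRECONDITION & SPEC =====
def Spec_enable_operator_fusion (graph_ops : List String) (out : List String) : Prop := out = enable_operator_fusion_alt graph_ops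
instance (graph_ops : List String) (out : List String) : Decidable (Spec_enable_operator_fusion graph_ops out) := by unfold Spec_enable_operator_fusion; infer_instance

-- ===== CLAIM (what is proved, stated in full; the proofs are below) =====
def Claim_equal_enable_operator_fusion : Prop := ∀ (graph_ops : List String), Dom_enable_operator_fusion graph_ops → Spec_enable_operator_fusion graph_ops (enable_operator_fusion graph_ops)

-- ===== LEMMAS AND PROOFS =====

theorem fuseStep_nil (a : String) : fuseStep [] a = [a] := by
  simp [fuseStep]

theorem fuseStep_concat (ys : List String) (x a : String) :
    fuseStep (ys ++ [x]) a =
      if x = "conv2d" ∧ a = "relu" then ys ++ ["conv2d_relu_fused"]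
      else if x = "matmul" ∧ a = "add" then ys ++ ["matmul_add_fused"]
      else ys ++ [x, a] := by
  have h1 : (ys ++ [x]) ++ [a] = ys ++ [x, a] := by simp
  have hlen : (ys ++ [x, a]).length - 2 = ys.length := by simp
  have hdrop : (ys ++ [x, a]).drop ys.length = [x, a] := by simp
  have htake : (ys ++ [x, a]).take ys.length = ys := by simp
  simp only [fuseStep, h1, hlen, hdrop, htake]
  by_cases hc : x = "conv2d" ∧ a = "relu"
  · simp [hc.1, hc.2]
  · by_cases hm : x = "matmul" ∧ a = "add"
    · have : ¬ ([x, a] = ["conv2d", "relu"]) := by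
        simp only [List.cons.injEq, and_true]; intro h; exact hc ⟨h.1, h.2⟩
      simp [hm.1, hm.2]
    · have h2 : ¬ ([x, a] = ["conv2d", "relu"]) := by
        simp only [List.cons.injEq, and_true]; intro h; exact hc ⟨h.1, h.2⟩
      have h3 : ¬ ([x, a] = ["matmul", "add"]) := by
        simp only [List.cons.injEq, and_true]; intro h; exact hm ⟨h.1, h.2⟩
      simp [h2, h3, hc, hm]

-- push with no fire: if the stack's last element does not start a fusable pair with a
theorem fuseStep_push (acc : List String) (a : String)
    (h : ∀ x, acc.getLast? = some x →
      ¬((x = "conv2d" ∧ a = "relu") ∨ (x = "matmul" ∧ a = "add"))) :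
    fuseStep acc a = acc ++ [a] := by
  rcases List.eq_nil_or_concat acc with rfl | ⟨ys, x, rfl⟩
  · simp [fuseStep_nil]
  · simp only [List.concat_eq_append] at h ⊢
    have hx : (ys ++ [x]).getLast? = some x := by simp
    have hnf := h x hx
    rw [fuseStep_concat]
    have h2 : ¬(x = "conv2d" ∧ a = "relu") := fun hh => hnf (Or.inl hh)
    have h3 : ¬(x = "matmul" ∧ a = "add") := fun hh => hnf (Or.inr hh)
    simp [h2, h3]

theorem foldl_fuse_main (n : Nat) :
    ∀ (l acc : List String), l.length ≤ n →
      (∀ x a, acc.getLast? = some x → l.head? = some a →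
        ¬((x = "conv2d" ∧ a = "relu") ∨ (x = "matmul" ∧ a = "add"))) →
      List.foldl fuseStep acc l = acc ++ enable_operator_fusion l := by
  induction n with
  | zero =>
    intro l acc hl _
    have : l = [] := List.eq_nil_of_length_eq_zero (Nat.le_zero.mp hl)
    subst this; simp [enable_operator_fusion]
  | succ n ih =>
    intro l acc hl hno
    match l with
    | [] => simp [enable_operator_fusion]
    | a :: rest =>
      have hpush : fuseStep acc a = acc ++ [a] := by
        apply fuseStep_push
        intro x hx
        exact hno x a hx rfl
      match rest with
      | [] =>
        simp [List.foldl, hpush, enable_operator_fusion]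
      | b :: rest' =>
        by_cases hc : a = "conv2d" ∧ b = "relu"
        · have hstep2 : fuseStep (acc ++ [a]) b = acc ++ ["conv2d_relu_fused"] := by
            rw [fuseStep_concat]; simp [hc.1, hc.2]
          have hrec : List.foldl fuseStep (acc ++ ["conv2d_relu_fused"]) rest'
              = acc ++ ["conv2d_relu_fused"] ++ enable_operator_fusion rest' := by
            apply ih
            · simp at hl ⊢; omega
            · intro x c hx _
              have : x = "conv2d_relu_fused" := by
                have h' : "conv2d_relu_fused" = x := by simpa using hx
                exact h'.symm
              subst this; simp
          calc List.foldl fuseStep acc (a :: b :: rest')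
              = List.foldl fuseStep (acc ++ ["conv2d_relu_fused"]) rest' := by
                simp [List.foldl, hpush, hstep2]
            _ = acc ++ ["conv2d_relu_fused"] ++ enable_operator_fusion rest' := hrec
            _ = acc ++ enable_operator_fusion (a :: b :: rest') := by
                simp [enable_operator_fusion, hc.1, hc.2]
        · by_cases hm : a = "matmul" ∧ b = "add"
          · have hstep2 : fuseStep (acc ++ [a]) b = acc ++ ["matmul_add_fused"] := by
              rw [fuseStep_concat]
              have h2 : ¬(a = "conv2d" ∧ b = "relu") := hc
              simp [hm.1, hm.2]
            have hrec : List.foldl fuseStep (acc ++ ["matmul_add_fused"]) rest'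
                = acc ++ ["matmul_add_fused"] ++ enable_operator_fusion rest' := by
              apply ih
              · simp at hl ⊢; omega
              · intro x c hx _
                have : x = "matmul_add_fused" := by
                  have h' : "matmul_add_fused" = x := by simpa using hx
                  exact h'.symm
                subst this; simp
            calc List.foldl fuseStep acc (a :: b :: rest')
                = List.foldl fuseStep (acc ++ ["matmul_add_fused"]) rest' := by
                  simp [List.foldl, hpush, hstep2]
              _ = acc ++ ["matmul_add_fused"] ++ enable_operator_fusion rest' := hrec
              _ = acc ++ enable_operator_fusion (a :: b :: rest') := by
                  simp [enable_operator_fusion, hm]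
          · have hrec : List.foldl fuseStep (acc ++ [a]) (b :: rest')
                = acc ++ [a] ++ enable_operator_fusion (b :: rest') := by
              apply ih
              · simp at hl ⊢; omega
              · intro x c hx hhd
                have hxa : x = a := by
                  have h' : a = x := by simpa using hx
                  exact h'.symm
                have hcb : c = b := by
                  have h' : b = c := by simpa using hhd
                  exact h'.symm
                subst hxa; subst hcb
                intro hfire
                rcases hfire with h | h
                · exact hc h
                · exact hm h
            calc List.foldl fuseStep acc (a :: b :: rest')
                = List.foldl fuseStep (acc ++ [a]) (b :: rest') := by
                  simp [List.foldl, hpush]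
              _ = acc ++ [a] ++ enable_operator_fusion (b :: rest') := hrec
              _ = acc ++ enable_operator_fusion (a :: b :: rest') := by
                  simp [enable_operator_fusion, hc, hm]

-- ===== VERDICT (by name: the statement is the Claim_ definition above) =====
theorem enable_operator_fusion_spec : Claim_equal_enable_operator_fusion := by
  intro graph_ops _
  unfold Spec_enable_operator_fusion enable_operator_fusion_alt
  have := foldl_fuse_main graph_ops.length graph_ops [] (le_refl _) (by simp)
  simp at this
  exact this.symm
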